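-- pv_equiv track=rewrite | github.com/isi-nlp/NewsEdits | util/util_newssniffer_parsing.py | cluster_edits
-- ===== SOURCE A (Python) =====
-- def cluster_edits(vo, vn):
--     clustered_edits = []
--     current_cluster = []
--     for o, n in list(zip(vo, vn)):
--         if (o['tag'] in ['+', '-']) or (n['tag'] in ['+', '-']):
--             current_cluster.append((o, n))
--         ##
--         if o['tag'] == ' ' and n['tag'] == ' ':
--             if len(current_cluster) > 0:
--                 clustered_edits.append(current_cluster)
--                 current_cluster = []
--             clustered_edits.append([(o, n)])
--     if len(current_cluster) > 0:
--         clustered_edits.append(current_cluster)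
--     return clustered_edits
-- ===== SOURCE B (Python) =====
-- def cluster_edits(vo, vn):
--     # Run-based decomposition: split the zipped pairs into maximal runs of equal
--     # "both tags are ' '" key, then shape each run: equal runs become singleton
--     # clusters, non-equal runs become one cluster of their '+'/'-' pairs (if any).
--     pairs = list(zip(vo, vn))
--
--     def both_equal(p):
--         return p[0]['tag'] == ' ' and p[1]['tag'] == ' '
--
--     out = []
--     i = 0
--     while i < len(pairs):
--         k = both_equal(pairs[i])
--         j = i + 1
--         while j < len(pairs) and both_equal(pairs[j]) == k:
--             j += 1
--         run = pairs[i:j]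
--         if k:
--             out.extend([p] for p in run)
--         else:
--             cluster = [p for p in run
--                        if p[0]['tag'] in ('+', '-') or p[1]['tag'] in ('+', '-')]
--             if cluster:
--                 out.append(cluster)
--         i = j
--     return out
-- ===== Notes on version B (the rewrite author's own statement) =====
-- stated objective: alternative
-- what changed: B replaces A's inline accumulator-and-flush loop by a run-splitting decomposition: it cuts the zipped pairs into maximal runs of the key "both tags are ' '", maps equal runs to singleton clusters and non-equal runs to one filtered cluster of their '+'/'-' pairs.
import Mathlib
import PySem

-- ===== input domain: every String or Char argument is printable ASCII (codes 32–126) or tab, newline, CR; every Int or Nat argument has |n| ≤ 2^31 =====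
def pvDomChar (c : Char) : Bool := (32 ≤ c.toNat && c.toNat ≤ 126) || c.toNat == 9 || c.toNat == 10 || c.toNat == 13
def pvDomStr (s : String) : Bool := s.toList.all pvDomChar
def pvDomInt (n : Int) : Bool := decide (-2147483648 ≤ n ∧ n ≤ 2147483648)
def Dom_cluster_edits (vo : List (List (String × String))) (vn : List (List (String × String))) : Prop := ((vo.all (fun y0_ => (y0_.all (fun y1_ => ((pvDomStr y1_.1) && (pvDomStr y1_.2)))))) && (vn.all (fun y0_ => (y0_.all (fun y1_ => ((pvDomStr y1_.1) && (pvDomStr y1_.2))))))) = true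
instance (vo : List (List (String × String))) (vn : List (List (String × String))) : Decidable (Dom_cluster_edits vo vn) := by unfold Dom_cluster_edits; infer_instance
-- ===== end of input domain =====

-- B groups the zipped pairs into maximal runs of the key "both tags are ' '" and shapes each
-- run wholesale, instead of A's inline accumulator-and-flush loop (objective: alternative).

-- d['tag'] : first-match association-list lookup (none = KeyError, excluded by Pre_)
def lookTag (d : List (String × String)) : Option String :=
  (d.find? (fun kv => kv.1 == "tag")).map (·.2)

-- o['tag'] as used by both ports; the default "" is never reached inside Pre_ (KeyError excluded)
def tagOf (d : List (String × String)) : String := (lookTag d).getD ""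

-- (o['tag'] in ['+','-']) or (n['tag'] in ['+','-'])
def isChange (p : (List (String × String)) × (List (String × String))) : Bool :=
  ["+", "-"].contains (tagOf p.1) || ["+", "-"].contains (tagOf p.2)

-- o['tag'] == ' ' and n['tag'] == ' '
def bothEqual (p : (List (String × String)) × (List (String × String))) : Bool :=
  tagOf p.1 == " " && tagOf p.2 == " "

-- ===== PORT A =====
-- loop body of A: state = (clustered_edits, current_cluster)
def stepA (st : List (List ((List (String × String)) × (List (String × String)))) ×
                List ((List (String × String)) × (List (String × String))))
    (p : (List (String × String)) × (List (String × String))) :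
    List (List ((List (String × String)) × (List (String × String)))) ×
    List ((List (String × String)) × (List (String × String))) :=
  let cc := if isChange p then st.2 ++ [p] else st.2
  if bothEqual p then
    ((if 0 < cc.length then st.1 ++ [cc] else st.1) ++ [[p]], [])
  else
    (st.1, cc)

def cluster_edits (vo : List (List (String × String))) (vn : List (List (String × String))) : List (List ((List (String × String)) × (List (String × String)))) :=
  let st := (vo.zip vn).foldl stepA ([], [])
  if 0 < st.2.length then st.1 ++ [st.2] else st.1

-- ===== PORT B =====
-- inner while loop of B: maximal run of pairs whose key equals k, plus the rest
def runsB (ps : List ((List (String × String)) × (List (String × String)))) :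
    List (Bool × List ((List (String × String)) × (List (String × String)))) :=
  match ps with
  | [] => []
  | p :: rest =>
    let k := bothEqual p
    (k, p :: rest.takeWhile (fun q => bothEqual q == k)) ::
      runsB (rest.dropWhile (fun q => bothEqual q == k))
termination_by ps.length
decreasing_by
  exact Nat.lt_succ_of_le (List.length_dropWhile_le _ _)

-- outer while loop of B: shape each run and append to out
def emitB (rs : List (Bool × List ((List (String × String)) × (List (String × String))))) :
    List (List ((List (String × String)) × (List (String × String)))) :=
  match rs with
  | [] => []
  | (k, run) :: rest =>
    (if k then run.map (fun p => [p])
     else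
       let c := run.filter isChange
       if c.isEmpty then [] else [c]) ++ emitB rest

def cluster_edits_alt (vo : List (List (String × String))) (vn : List (List (String × String))) : List (List ((List (String × String)) × (List (String × String)))) :=
  emitB (runsB (vo.zip vn))

-- ===== PRECONDITION & SPEC =====
-- Pre_ excludes exactly the inputs where A raises KeyError: a zipped pair whose first dict has
-- no 'tag' key, or whose second dict has no 'tag' key while the first's tag is not '+'/'-'
-- (short-circuit: with first tag '+'/'-' the second dict's 'tag' is never read).
def Pre_cluster_edits (vo : List (List (String × String))) (vn : List (List (String × String))) : Prop :=
  ∀ p ∈ vo.zip vn, (lookTag p.1).isSome = true ∧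
    ((lookTag p.2).isSome = true ∨ lookTag p.1 = some "+" ∨ lookTag p.1 = some "-")
instance (vo : List (List (String × String))) (vn : List (List (String × String))) : Decidable (Pre_cluster_edits vo vn) := by unfold Pre_cluster_edits; infer_instance

def pvWitness_cluster_edits : (List (List (String × String))) × (List (List (String × String))) :=
  ([[("tag", "+")], [("tag", " ")]], [[("tag", " ")], [("tag", " ")]])

def Spec_cluster_edits (vo : List (List (String × String))) (vn : List (List (String × String))) (out : List (List ((List (String × String)) × (List (String × String))))) : Prop := out = cluster_edits_alt vo vn
instance (vo : List (List (String × String))) (vn : List (List (String × String))) (out : List (List ((List (String × String)) × (List (String × String))))) : Decidable (Spec_cluster_edits vo vn out) := by unfold Spec_cluster_edits; infer_instance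

-- ===== CLAIM (what is proved, stated in full; the proofs are below) =====
def Claim_equal_cluster_edits : Prop := ∀ (vo : List (List (String × String))) (vn : List (List (String × String))), Dom_cluster_edits vo vn → Pre_cluster_edits vo vn → Spec_cluster_edits vo vn (cluster_edits vo vn)

-- ===== LEMMAS AND PROOFS =====

-- structural description of A's loop (clusters emitted from position onward, incl. final flush)
def loopA (ps : List ((List (String × String)) × (List (String × String))))
    (cc : List ((List (String × String)) × (List (String × String)))) :
    List (List ((List (String × String)) × (List (String × String)))) :=
  match ps with
  | [] => if cc.isEmpty then [] else [cc]
  | p :: rest =>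
    let cc' := if isChange p then cc ++ [p] else cc
    if bothEqual p then (if cc'.isEmpty then [] else [cc']) ++ [p] :: loopA rest []
    else loopA rest cc'

theorem bothEqual_not_change {p : (List (String × String)) × (List (String × String))}
    (h : bothEqual p = true) : isChange p = false := by
  simp only [bothEqual, Bool.and_eq_true, beq_iff_eq] at h
  simp [isChange, h.1, h.2]

theorem foldA_eq (ps : List ((List (String × String)) × (List (String × String))))
    (ce : List (List ((List (String × String)) × (List (String × String)))))
    (cc : List ((List (String × String)) × (List (String × String)))) :
    (if 0 < (ps.foldl stepA (ce, cc)).2.length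
     then (ps.foldl stepA (ce, cc)).1 ++ [(ps.foldl stepA (ce, cc)).2]
     else (ps.foldl stepA (ce, cc)).1) = ce ++ loopA ps cc := by
  induction ps generalizing ce cc with
  | nil =>
    simp only [List.foldl_nil, loopA, List.isEmpty_iff]
    rcases Nat.eq_zero_or_pos cc.length with h | h
    · simp [List.length_eq_zero_iff.mp h]
    · have : cc ≠ [] := by
        intro hc; simp [hc] at h
      simp [h, this]
  | cons p rest ih =>
    simp only [List.foldl_cons, loopA]
    by_cases hb : bothEqual p = true
    · simp only [stepA, hb, if_pos trivial]
      rw [ih]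
      rcases Nat.eq_zero_or_pos (if isChange p then cc ++ [p] else cc).length with h | h
      · have he : (if isChange p then cc ++ [p] else cc).isEmpty = true := by
          simp [List.length_eq_zero_iff.mp h]
        simp only [Nat.lt_irrefl, h]
        simp [he]
      · have hne : (if isChange p then cc ++ [p] else cc) ≠ [] := by
          intro hc; rw [hc] at h; simp at h
        simp [h, hne, List.isEmpty_iff]
    · simp only [Bool.not_eq_true] at hb
      simp only [stepA, hb]
      simp only [Bool.false_eq_true, if_false]
      rw [ih]

theorem loopA_false_run (run rest : List ((List (String × String)) × (List (String × String))))
    (cc : List ((List (String × String)) × (List (String × String))))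
    (h : ∀ q ∈ run, bothEqual q = false) :
    loopA (run ++ rest) cc = loopA rest (cc ++ run.filter isChange) := by
  induction run generalizing cc with
  | nil => simp
  | cons q t ih =>
    have hq : bothEqual q = false := h q (List.mem_cons_self)
    have ht : ∀ x ∈ t, bothEqual x = false := fun x hx => h x (List.mem_cons_of_mem _ hx)
    simp only [List.cons_append, loopA, hq, Bool.false_eq_true, if_false]
    by_cases hc : isChange q = true
    · simp only [hc, if_pos trivial, List.filter_cons, ih _ ht, List.append_assoc,
        List.singleton_append]
    · simp only [Bool.not_eq_true] at hc
      simp [hc, ih _ ht]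

theorem loopA_flush (ps : List ((List (String × String)) × (List (String × String))))
    (cc : List ((List (String × String)) × (List (String × String))))
    (h : ps = [] ∨ ∃ q rest, ps = q :: rest ∧ bothEqual q = true) :
    loopA ps cc = (if cc.isEmpty then [] else [cc]) ++ loopA ps [] := by
  rcases h with h | ⟨q, rest, rfl, hq⟩
  · subst h; simp [loopA]
  · have hci : isChange q = false := bothEqual_not_change hq
    simp [loopA, hq, hci]

theorem loopA_true_run (run rest : List ((List (String × String)) × (List (String × String))))
    (h : ∀ q ∈ run, bothEqual q = true) :
    loopA (run ++ rest) [] = run.map (fun p => [p]) ++ loopA rest [] := by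
  induction run with
  | nil => simp
  | cons q t ih =>
    have hq : bothEqual q = true := h q (List.mem_cons_self)
    have ht : ∀ x ∈ t, bothEqual x = true := fun x hx => h x (List.mem_cons_of_mem _ hx)
    have hci : isChange q = false := bothEqual_not_change hq
    simp [loopA, hq, hci, ih ht]

theorem head_dropWhile_false {α : Type} (p : α → Bool) (l : List α)
    (q : α) (rest : List α) (h : l.dropWhile p = q :: rest) : p q = false := by
  induction l with
  | nil => simp at h
  | cons x t ih =>
    by_cases hx : p x = true
    · rw [List.dropWhile_cons_of_pos hx] at h; exact ih h
    · simp only [Bool.not_eq_true] at hx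
      rw [List.dropWhile_cons_of_neg (by simp [hx])] at h
      cases h; exact hx

theorem loopA_eq_emitB (ps : List ((List (String × String)) × (List (String × String)))) :
    loopA ps [] = emitB (runsB ps) := by
  induction hn : ps.length using Nat.strong_induction_on generalizing ps with
  | _ n ih =>
  match ps, hn with
  | [], _ => simp [loopA, runsB, emitB]
  | p :: rest, hn =>
    set k := bothEqual p with hk
    set run := rest.takeWhile (fun q => bothEqual q == k) with hrun
    set rest' := rest.dropWhile (fun q => bothEqual q == k) with hrest'
    have hsplit : rest = run ++ rest' := (List.takeWhile_append_dropWhile).symm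
    have hrunmem : ∀ q ∈ run, bothEqual q = k := by
      intro q hq
      have := List.mem_takeWhile_imp (hrun ▸ hq)
      simpa using this
    have hlen : rest'.length < n := by
      subst hn
      exact Nat.lt_succ_of_le (List.length_dropWhile_le _ _)
    have hIH : loopA rest' [] = emitB (runsB rest') := ih _ hlen rest' rfl
    have hrunsB : runsB (p :: rest) = (k, p :: run) :: runsB rest' := by
      rw [runsB]
    rw [hrunsB]
    by_cases hkt : k = true
    · -- equal run: every element singleton
      have hp : bothEqual p = true := hk ▸ hkt
      have hci : isChange p = false := bothEqual_not_change hp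
      have : loopA (p :: rest) [] = [p] :: loopA rest [] := by
        simp [loopA, hp, hci]
      rw [this, hsplit, loopA_true_run run rest' (fun q hq => by rw [hrunmem q hq, hkt]), hIH]
      simp [emitB, hkt]
    · -- non-equal run: one filtered cluster
      have hkf : k = false := by simpa using hkt
      have hp : bothEqual p = false := hk ▸ hkf
      have hrunf : ∀ q ∈ p :: run, bothEqual q = false := by
        intro q hq
        rcases List.mem_cons.mp hq with rfl | hq
        · exact hp
        · rw [hrunmem q hq, hkf]
      have hstep : loopA (p :: rest) [] = loopA ((p :: run) ++ rest') [] := by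
        rw [hsplit]; rfl
      rw [hstep, loopA_false_run _ _ _ hrunf]
      have hflush : rest' = [] ∨ ∃ q t, rest' = q :: t ∧ bothEqual q = true := by
        cases hre : rest' with
        | nil => exact Or.inl rfl
        | cons q t =>
          refine Or.inr ⟨q, t, rfl, ?_⟩
          have := head_dropWhile_false (fun q => bothEqual q == k) rest q t (hrest' ▸ hre)
          simp only [beq_eq_false_iff_ne, ne_eq] at this
          cases hbq : bothEqual q
          · exact absurd (hkf ▸ hbq) this
          · rfl
      rw [loopA_flush _ _ hflush, hIH]
      simp [emitB, hkf]

-- ===== VERDICT (by name: the statement is the Claim_ definition above) =====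
theorem cluster_edits_spec : Claim_equal_cluster_edits := by
  intro vo vn _ _
  show cluster_edits vo vn = cluster_edits_alt vo vn
  have h := foldA_eq (vo.zip vn) [] []
  simp only [List.nil_append] at h
  calc cluster_edits vo vn = loopA (vo.zip vn) [] := h
    _ = cluster_edits_alt vo vn := loopA_eq_emitB _
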